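-- pv_equiv track=rewrite | github.com/Anish45/8bit-adder | input.py | validBinaryValue
-- ===== SOURCE A (Python) =====
-- def validBinaryValue(inputvalue):
--         validation = False
--         for i in inputvalue:
--             if(i in ["0","1"]):
--                 validation = True
--             else:
--                 validation =  False
--                 break
--         return validation
-- ===== SOURCE B (Python) =====
-- def validBinaryValue(inputvalue):
--     return len(inputvalue) > 0 and inputvalue.count("0") + inputvalue.count("1") == len(inputvalue)
-- ===== Notes on version B (the rewrite author's own statement) =====
-- stated objective: alternative
-- what changed: Replaces the per-character early-break loop with a mutable flag by an arithmetic criterion: the string is binary iff it is non-empty and the occurrence counts of the two binary digits add up to its length (two str.count passes, no branching per character).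
import Mathlib
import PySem

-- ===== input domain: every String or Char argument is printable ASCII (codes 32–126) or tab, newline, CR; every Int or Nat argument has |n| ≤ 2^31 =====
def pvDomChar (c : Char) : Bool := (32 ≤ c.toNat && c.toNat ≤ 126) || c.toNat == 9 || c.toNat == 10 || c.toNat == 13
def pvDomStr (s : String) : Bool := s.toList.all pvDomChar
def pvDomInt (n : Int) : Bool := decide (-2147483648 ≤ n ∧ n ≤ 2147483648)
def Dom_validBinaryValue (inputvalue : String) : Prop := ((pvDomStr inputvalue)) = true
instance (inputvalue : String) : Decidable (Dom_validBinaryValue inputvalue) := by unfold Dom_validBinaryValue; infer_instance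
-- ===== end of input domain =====

-- B replaces A's early-break flag loop by an arithmetic criterion: non-empty and the two digit-occurrence counts sum to the length (objective: alternative).
-- ===== PORT A =====
-- validation=False; for i in inputvalue: if i in ["0","1"]: validation=True else: validation=False; break
def validBinaryValueLoop : List Char → Bool → Bool
  | [], validation => validation
  | i :: rest, _ =>
    if i = '0' ∨ i = '1' then validBinaryValueLoop rest true
    else false

def validBinaryValue (inputvalue : String) : Bool :=
  validBinaryValueLoop inputvalue.toList false

-- ===== PORT B =====
-- len(inputvalue) > 0 and inputvalue.count("0") + inputvalue.count("1") == len(inputvalue)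
def validBinaryValue_alt (inputvalue : String) : Bool :=
  decide (0 < PySem.Str.len inputvalue) &&
    decide ((PySem.Str.count inputvalue "0" + PySem.Str.count inputvalue "1" : Int)
      = PySem.Str.len inputvalue)

-- ===== PRECONDITION & SPEC =====
def Spec_validBinaryValue (inputvalue : String) (out : Bool) : Prop := out = validBinaryValue_alt inputvalue
instance (inputvalue : String) (out : Bool) : Decidable (Spec_validBinaryValue inputvalue out) := by unfold Spec_validBinaryValue; infer_instance

-- ===== CLAIM =====
def Claim_equal_validBinaryValue : Prop := ∀ (inputvalue : String), Dom_validBinaryValue inputvalue → Spec_validBinaryValue inputvalue (validBinaryValue inputvalue)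

-- ===== LEMMAS AND PROOFS =====

-- Python str.count of a single-character pattern counts its occurrences.
lemma count_go_single (c : Char) (l : List Char) (fuel acc : ℕ) (h : l.length ≤ fuel) :
    PySem.Chars.count.go [c] fuel l acc = acc + l.count c := by
  induction l generalizing fuel acc with
  | nil => cases fuel <;> simp [PySem.Chars.count.go]
  | cons x t ih =>
    cases fuel with
    | zero => simp at h
    | succ n =>
      have hn : t.length ≤ n := by simpa using h
      by_cases hx : c = x
      · have : [c].isPrefixOf (x :: t) = true := by simp [List.isPrefixOf, hx]
        simp [PySem.Chars.count.go, ih _ _ hn, hx.symm]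
        omega
      · have : [c].isPrefixOf (x :: t) = false := by
          simp [List.isPrefixOf]; exact fun h' => hx h'
        have hxc : (x == c) = false := by simp [Ne.symm hx]
        simp [PySem.Chars.count.go, this, ih _ _ hn, List.count_cons, hxc]

lemma chars_count_single (c : Char) (l : List Char) :
    PySem.Chars.count l [c] = l.count c := by
  simp [PySem.Chars.count, count_go_single c l l.length 0 le_rfl]

-- A's loop once the flag is true is an "all characters binary" check.
lemma loop_true_eq_all (cs : List Char) :
    validBinaryValueLoop cs true = cs.all (fun c => c = '0' || c = '1') := by
  induction cs with
  | nil => rfl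
  | cons c rest ih =>
    by_cases h : c = '0' ∨ c = '1'
    · have h' : (c = '0' || c = '1') = true := by rcases h with h | h <;> simp [h]
      simp [validBinaryValueLoop, h, ih, h']
    · have h' : (c = '0' || c = '1') = false := by
        rcases not_or.mp h with ⟨h1, h2⟩; simp [h1, h2]
      simp [validBinaryValueLoop, h, h']

-- Occurrences of the two distinct digits jointly fit in the length.
lemma count01_le_length (cs : List Char) :
    cs.count '0' + cs.count '1' ≤ cs.length := by
  induction cs with
  | nil => simp
  | cons c rest ih =>
    simp only [List.count_cons, List.length_cons]
    by_cases h0 : c = '0'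
    · have : (c == '1') = false := by simp [h0]
      simp [h0]; omega
    · have e0 : (c == '0') = false := by simp [h0]
      simp [e0]
      by_cases h1 : c = '1' <;> simp [h1] <;> omega

-- The counting criterion equals the "all characters binary" check.
lemma counts_eq_all (cs : List Char) :
    (decide (cs.count '0' + cs.count '1' = cs.length))
      = cs.all (fun c => c = '0' || c = '1') := by
  induction cs with
  | nil => simp
  | cons c rest ih =>
    have hle : rest.count '0' + rest.count '1' ≤ rest.length := count01_le_length rest
    by_cases h0 : c = '0'
    · subst h0
      simp only [List.all_cons, List.count_cons, List.length_cons, ← ih]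
      simp
      omega
    · by_cases h1 : c = '1'
      · subst h1
        simp only [List.all_cons, List.count_cons, List.length_cons, ← ih]
        simp
        omega
      · have e0 : (c == '0') = false := by simp [h0]
        have e1 : (c == '1') = false := by simp [h1]
        simp only [List.all_cons, List.count_cons, List.length_cons, e0, e1]
        simp [h0, h1]
        omega

-- ===== VERDICT =====
theorem validBinaryValue_spec : Claim_equal_validBinaryValue := by
  intro s _
  unfold Spec_validBinaryValue validBinaryValue validBinaryValue_alt
  have hb : decide ((PySem.Str.count s "0" + PySem.Str.count s "1" : Int) = PySem.Str.len s)
      = s.toList.all (fun c => c = '0' || c = '1') := by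
    have h0 : PySem.Str.count s "0" = s.toList.count '0' := by
      simpa using chars_count_single '0' s.toList
    have h1 : PySem.Str.count s "1" = s.toList.count '1' := by
      simpa using chars_count_single '1' s.toList
    have hiff : ((s.toList.count '0' + s.toList.count '1' : Int) = (s.toList.length : Int))
        ↔ (s.toList.count '0' + s.toList.count '1' = s.toList.length) := by
      exact_mod_cast Iff.rfl
    rw [h0, h1, PySem.Str.len, decide_eq_decide.mpr hiff, counts_eq_all]
  rw [hb]
  cases h : s.toList with
  | nil => simp [validBinaryValueLoop, PySem.Str.len, h]
  | cons c rest =>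
    have hlen : (0 : Int) < PySem.Str.len s := by
      simp [PySem.Str.len, h]
    simp only [hlen, decide_true, Bool.true_and, List.all_cons]
    by_cases hc : c = '0' ∨ c = '1'
    · have h' : (c = '0' || c = '1') = true := by rcases hc with hc | hc <;> simp [hc]
      rw [validBinaryValueLoop, if_pos hc, loop_true_eq_all, h', Bool.true_and]
    · have h' : (c = '0' || c = '1') = false := by
        rcases not_or.mp hc with ⟨h1, h2⟩; simp [h1, h2]
      rw [validBinaryValueLoop, if_neg hc, h', Bool.false_and]
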